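-- pv_equiv track=rewrite | github.com/smaruf/data-engineering | cobol-project/converters/converter_utils.py | format_cobol_comment
-- ===== SOURCE A (Python) =====
-- def format_cobol_comment(text: str, width: int = 65) -> list:
--     """
--     Format text as COBOL comments
--
--     Args:
--         text: Comment text
--         width: Maximum width of comment (default 65)
--
--     Returns:
--         List of formatted comment lines
--     """
--     lines = []
--     lines.append("      *" + "*" * width + "*")
--
--     words = text.split()
--     current_line = "      * "
--
--     for word in words:
--         if len(current_line) + len(word) + 1 <= width + 8:
--             current_line += word + " "
--         else:
--             # Pad the line to full width
--             padding = " " * (width + 8 - len(current_line))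
--             lines.append(current_line + padding + "*")
--             current_line = "      * " + word + " "
--
--     if current_line.strip() != "      *":
--         padding = " " * (width + 8 - len(current_line))
--         lines.append(current_line + padding + "*")
--
--     lines.append("      *" + "*" * width + "*")
--     return lines
-- ===== SOURCE B (Python) =====
-- def format_cobol_comment(text: str, width: int = 65) -> list:
--     """Two-phase rewrite: first greedily group words, then render each group."""
--     # Phase 1: group words greedily by running line length (prefix "      * " = 8 chars).
--     groups = [[]]
--     used = 8
--     for word in text.split():
--         if used + len(word) + 1 <= width + 8:
--             groups[-1].append(word)
--             used += len(word) + 1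
--         else:
--             groups.append([word])
--             used = 8 + len(word) + 1
--     # Phase 2: render.
--     border = "      *" + "*" * width + "*"
--     body = []
--     for g in groups:
--         line = "      * " + "".join(w + " " for w in g)
--         body.append(line + " " * (width + 8 - len(line)) + "*")
--     return [border] + body + [border]
-- ===== Notes on version B (the rewrite author's own statement) =====
-- stated objective: alternative
-- what changed: A interleaves word-wrapping and line rendering in one stateful loop over a growing string buffer; B separates the two concerns into a grouping pass that only tracks word lists and a running integer length, followed by a rendering pass that formats each group.
import Mathlib
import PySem

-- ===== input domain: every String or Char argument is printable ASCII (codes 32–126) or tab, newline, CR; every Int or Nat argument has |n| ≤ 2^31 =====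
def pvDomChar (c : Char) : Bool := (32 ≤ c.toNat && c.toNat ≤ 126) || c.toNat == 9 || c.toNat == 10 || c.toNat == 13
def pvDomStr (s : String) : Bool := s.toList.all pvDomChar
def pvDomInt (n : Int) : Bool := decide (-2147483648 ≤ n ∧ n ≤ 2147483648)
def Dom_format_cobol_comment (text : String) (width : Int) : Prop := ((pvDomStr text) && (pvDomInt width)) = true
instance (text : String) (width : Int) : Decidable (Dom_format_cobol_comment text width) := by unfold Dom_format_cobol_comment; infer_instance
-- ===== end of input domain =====

-- B restructures A's single stateful wrap-and-render loop into a grouping pass plus a rendering pass (objective: alternative decomposition; same cost).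
-- Both ports work over List Char internally (exact on the ASCII domain) and produce Strings at the end.

-- ===== PORT A =====
-- the loop body of A's 'for word in words'
def fmtA_step (width : Int) (st : List (List Char) × List Char) (word : List Char) :
    List (List Char) × List Char :=
  if PySem.Chars.len st.2 + PySem.Chars.len word + 1 ≤ width + 8 then
    (st.1, st.2 ++ word ++ [' '])
  else
    (st.1 ++ [st.2 ++ PySem.List.pyRepeat [' '] (width + 8 - PySem.Chars.len st.2) ++ ['*']],
     "      * ".toList ++ word ++ [' '])

def format_cobol_comment (text : String) (width : Int) : List String :=
  let border := "      *".toList ++ PySem.List.pyRepeat ['*'] width ++ ['*']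
  let words := PySem.Chars.split₀ text.toList
  let st := words.foldl (fmtA_step width) ([border], "      * ".toList)
  let lines :=
    if PySem.Chars.strip st.2 ≠ "      *".toList then
      st.1 ++ [st.2 ++ PySem.List.pyRepeat [' '] (width + 8 - PySem.Chars.len st.2) ++ ['*']]
    else st.1
  (lines ++ [border]).map String.ofList

-- ===== PORT B =====
-- phase 1 loop body: state is (finished groups, current group, running line length 'used')
def fmtB_step (width : Int) (st : List (List (List Char)) × List (List Char) × Int)
    (word : List Char) : List (List (List Char)) × List (List Char) × Int :=
  if st.2.2 + PySem.Chars.len word + 1 ≤ width + 8 then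
    (st.1, st.2.1 ++ [word], st.2.2 + PySem.Chars.len word + 1)
  else
    (st.1 ++ [st.2.1], [word], 8 + PySem.Chars.len word + 1)

-- phase 2: render one group of words as a padded comment line
def fmtB_render (width : Int) (g : List (List Char)) : List Char :=
  let line := "      * ".toList ++ (g.map (· ++ [' '])).flatten
  line ++ PySem.List.pyRepeat [' '] (width + 8 - PySem.Chars.len line) ++ ['*']

def format_cobol_comment_alt (text : String) (width : Int) : List String :=
  let border := "      *".toList ++ PySem.List.pyRepeat ['*'] width ++ ['*']
  let st := (PySem.Chars.split₀ text.toList).foldl (fmtB_step width) ([], [], 8)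
  let groups := st.1 ++ [st.2.1]
  (border :: groups.map (fmtB_render width) ++ [border]).map String.ofList

-- ===== PRECONDITION & SPEC =====
def Spec_format_cobol_comment (text : String) (width : Int) (out : List String) : Prop := out = format_cobol_comment_alt text width
instance (text : String) (width : Int) (out : List String) : Decidable (Spec_format_cobol_comment text width out) := by unfold Spec_format_cobol_comment; infer_instance

-- ===== CLAIM (what is proved, stated in full; the proofs are below) =====
def Claim_equal_format_cobol_comment : Prop := ∀ (text : String) (width : Int), Dom_format_cobol_comment text width → Spec_format_cobol_comment text width (format_cobol_comment text width)

-- ===== LEMMAS AND PROOFS =====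

-- A's current_line, expressed from B's current group
def linePrefix (g : List (List Char)) : List Char :=
  "      * ".toList ++ (g.map (· ++ [' '])).flatten

lemma len_linePrefix (g : List (List Char)) (used : Int)
    (h : used = PySem.Chars.len (linePrefix g)) (w : List Char) :
    used + PySem.Chars.len w + 1 = PySem.Chars.len (linePrefix (g ++ [w])) := by
  subst h
  simp [linePrefix, PySem.Chars.len_eq]
  omega

lemma linePrefix_append (g : List (List Char)) (w : List Char) :
    linePrefix (g ++ [w]) = linePrefix g ++ w ++ [' '] := by
  simp [linePrefix]

lemma loop_eq (width : Int) :
    ∀ (ws : List (List Char)) (acc : List (List Char))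
      (done : List (List (List Char))) (g : List (List Char)) (used : Int),
      used = PySem.Chars.len (linePrefix g) →
      ws.foldl (fmtA_step width) (acc ++ done.map (fmtB_render width), linePrefix g) =
        (acc ++ ((ws.foldl (fmtB_step width) (done, g, used)).1 ++
                  [(ws.foldl (fmtB_step width) (done, g, used)).2.1]).dropLast.map (fmtB_render width),
         linePrefix (ws.foldl (fmtB_step width) (done, g, used)).2.1) := by
  intro ws
  induction ws with
  | nil => intro acc done g used h; simp
  | cons w ws ih =>
    intro acc done g used h
    subst h
    by_cases hc : PySem.Chars.len (linePrefix g) + PySem.Chars.len w + 1 ≤ width + 8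
    · have hA : fmtA_step width (acc ++ done.map (fmtB_render width), linePrefix g) w
          = (acc ++ done.map (fmtB_render width), linePrefix (g ++ [w])) := by
        rw [fmtA_step, if_pos hc, linePrefix_append]
      have hB : fmtB_step width (done, g, PySem.Chars.len (linePrefix g)) w
          = (done, g ++ [w], PySem.Chars.len (linePrefix g) + PySem.Chars.len w + 1) := by
        rw [fmtB_step, if_pos hc]
      simp only [List.foldl_cons, hA, hB]
      rw [len_linePrefix g _ rfl w]
      exact ih acc done (g ++ [w]) _ rfl
    · have hA : fmtA_step width (acc ++ done.map (fmtB_render width), linePrefix g) w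
          = (acc ++ (done ++ [g]).map (fmtB_render width), linePrefix [w]) := by
        rw [fmtA_step, if_neg hc]
        simp [fmtB_render, linePrefix]
      have hB : fmtB_step width (done, g, PySem.Chars.len (linePrefix g)) w
          = (done ++ [g], [w], 8 + PySem.Chars.len w + 1) := by
        rw [fmtB_step, if_neg hc]
      simp only [List.foldl_cons, hA, hB]
      refine ih acc (done ++ [g]) [w] _ ?_
      simp [linePrefix, PySem.Chars.len_eq]
      omega

-- the final-flush test of A is always true: current_line starts with six spaces and a '*'
lemma strip_linePrefix_ne (g : List (List Char)) :
    PySem.Chars.strip (linePrefix g) ≠ "      *".toList := by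
  have hl : PySem.Chars.lstrip (linePrefix g)
      = '*' :: ' ' :: (g.map (· ++ [' '])).flatten := by
    rw [linePrefix, show ("      * ".toList : List Char)
          = [' ',' ',' ',' ',' ',' ','*',' '] from rfl]
    simp [PySem.Chars.lstrip, PySem.Chars.isspace]
  have hr : ∃ t, PySem.Chars.strip (linePrefix g) = '*' :: t := by
    rw [PySem.Chars.strip, hl, PySem.Chars.rstrip]
    rw [show ('*' :: ' ' :: (g.map (· ++ [' '])).flatten).reverse
          = (' ' :: (g.map (· ++ [' '])).flatten).reverse ++ ['*'] by simp]
    rw [List.dropWhile_append]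
    by_cases he : (List.dropWhile PySem.Chars.isspace
        (' ' :: (g.map (· ++ [' '])).flatten).reverse).isEmpty
    · rw [if_pos he]
      exact ⟨[], rfl⟩
    · rw [if_neg he, List.reverse_append]
      exact ⟨_, rfl⟩
  obtain ⟨t, ht⟩ := hr
  rw [ht, show ("      *".toList : List Char) = [' ',' ',' ',' ',' ',' ','*'] from rfl]
  intro h
  injection h with h1 _
  exact absurd h1 (by decide)

-- the whole computation, on word lists
lemma main_eq (width : Int) (ws : List (List Char)) (border : List Char) :
    ((if PySem.Chars.strip (ws.foldl (fmtA_step width) ([border], "      * ".toList)).2 ≠ "      *".toList then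
        (ws.foldl (fmtA_step width) ([border], "      * ".toList)).1 ++
          [(ws.foldl (fmtA_step width) ([border], "      * ".toList)).2 ++
            PySem.List.pyRepeat [' '] (width + 8 -
              PySem.Chars.len (ws.foldl (fmtA_step width) ([border], "      * ".toList)).2) ++ ['*']]
      else (ws.foldl (fmtA_step width) ([border], "      * ".toList)).1) ++ [border])
    = border :: ((ws.foldl (fmtB_step width) ([], [], 8)).1 ++
        [(ws.foldl (fmtB_step width) ([], [], 8)).2.1]).map (fmtB_render width) ++ [border] := by
  have key := loop_eq width ws [border] [] [] 8 (by decide)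
  rw [show ("      * ".toList : List Char) = linePrefix [] from rfl]
  simp only [List.map_nil, List.append_nil] at key
  rw [key]
  rw [if_pos (strip_linePrefix_ne _)]
  have hrender : ∀ g : List (List Char),
      linePrefix g ++ PySem.List.pyRepeat [' '] (width + 8 - PySem.Chars.len (linePrefix g)) ++ ['*']
        = fmtB_render width g := fun g => rfl
  rw [hrender, List.dropLast_concat]
  simp

-- ===== VERDICT (by name: the statement is the Claim_ definition above) =====
theorem format_cobol_comment_spec : Claim_equal_format_cobol_comment := by
  intro text width _
  unfold Spec_format_cobol_comment format_cobol_comment format_cobol_comment_alt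
  simp only []
  exact congrArg (List.map String.ofList)
    (main_eq width (PySem.Chars.split₀ text.toList) _)
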